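-- pv_equiv track=rewrite | github.com/AnnaPNM/Bank_Loan_Default_ML_2026 | Linear_SVM_Sk.py | infer_source_feature_name
-- ===== SOURCE A (Python) =====
-- def infer_source_feature_name(processed_feature_name, numeric_cols, categorical_cols):
--     name = str(processed_feature_name)
--     if name.startswith("num__"):
--         return name.replace("num__", "", 1)
--     if name.startswith("cat__"):
--         remainder = name.replace("cat__", "", 1)
--         for col in sorted(categorical_cols, key=len, reverse=True):
--             prefix = f"{col}_"
--             if remainder == col or remainder.startswith(prefix):
--                 return col
--         return remainder
--     return name
-- ===== SOURCE B (Python) =====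
-- def infer_source_feature_name(processed_feature_name, numeric_cols, categorical_cols):
--     name = str(processed_feature_name)
--     if name.startswith("num__"):
--         return name[len("num__"):]
--     if not name.startswith("cat__"):
--         return name
--     remainder = name[len("cat__"):]
--     best = None
--     for col in categorical_cols:
--         if remainder == col or remainder.startswith(col + "_"):
--             if best is None or len(col) > len(best):
--                 best = col
--     return remainder if best is None else best
-- ===== Notes on version B (the rewrite author's own statement) =====
-- stated objective: simpler
-- what changed: Replaced the length-descending sort plus first-match scan over categorical_cols by a single pass in the original order that keeps the strictly longest matching column seen so far (strict '>' reproduces the stable sort's earliest-wins tie-breaking), and stripped the num__/cat__ prefixes by slicing instead of replace(...,1).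
import Mathlib
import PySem

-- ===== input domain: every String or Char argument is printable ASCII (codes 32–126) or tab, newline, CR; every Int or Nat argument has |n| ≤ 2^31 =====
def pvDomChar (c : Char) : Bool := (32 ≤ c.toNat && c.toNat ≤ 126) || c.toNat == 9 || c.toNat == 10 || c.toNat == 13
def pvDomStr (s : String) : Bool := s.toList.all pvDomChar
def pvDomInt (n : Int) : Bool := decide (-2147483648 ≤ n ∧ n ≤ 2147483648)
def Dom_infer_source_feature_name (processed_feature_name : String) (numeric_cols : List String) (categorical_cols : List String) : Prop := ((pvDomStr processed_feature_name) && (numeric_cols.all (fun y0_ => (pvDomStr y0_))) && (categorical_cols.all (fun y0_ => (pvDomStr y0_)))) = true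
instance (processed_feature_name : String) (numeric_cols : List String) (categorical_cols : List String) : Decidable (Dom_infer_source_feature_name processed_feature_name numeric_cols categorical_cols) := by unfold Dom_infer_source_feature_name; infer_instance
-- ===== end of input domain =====

-- B replaces A's length-descending stable sort + first-match scan over categorical_cols
-- by a single pass in the original order keeping the strictly longest matching column (simpler).


-- ===== PORT A =====
-- the match test shared verbatim by A's loop and B's loop:
--   remainder == col or remainder.startswith(col + "_")
def pvMatches (remainder col : String) : Bool :=
  remainder == col || PySem.Str.startswith remainder (col ++ "_")

-- s.replace(old, new, 1): replace the first occurrence of old (exact, incl. old = "" -> new ++ s)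
def pvReplaceOnce (s old new : List Char) : List Char :=
  if old.isPrefixOf s then new ++ s.drop old.length
  else match s with
    | [] => []
    | c :: cs => c :: pvReplaceOnce cs old new

-- the 'for col in sorted(...)' loop: return the first matching col, else remainder
def pvACatLoop (remainder : String) : List String → String
  | [] => remainder
  | col :: rest => if pvMatches remainder col then col else pvACatLoop remainder rest

def infer_source_feature_name (processed_feature_name : String) (numeric_cols : List String) (categorical_cols : List String) : String :=
  let name := processed_feature_name
  if PySem.Str.startswith name "num__" then
    String.ofList (pvReplaceOnce name.toList "num__".toList [])
  else if PySem.Str.startswith name "cat__" then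
    let remainder := String.ofList (pvReplaceOnce name.toList "cat__".toList [])
    pvACatLoop remainder (PySem.List.sorted categorical_cols (fun c => PySem.Str.len c) true)
  else name

-- ===== PORT B =====
def pvBStep (remainder : String) (best : Option String) (col : String) : Option String :=
  if pvMatches remainder col then
    match best with
    | none => some col
    | some b => if PySem.Str.len b < PySem.Str.len col then some col else best
  else best

def infer_source_feature_name_alt (processed_feature_name : String) (numeric_cols : List String) (categorical_cols : List String) : String :=
  let name := processed_feature_name
  if PySem.Str.startswith name "num__" then
    String.ofList (PySem.List.slice name.toList (some 5) none)
  else if !PySem.Str.startswith name "cat__" then name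
  else
    let remainder := String.ofList (PySem.List.slice name.toList (some 5) none)
    match categorical_cols.foldl (pvBStep remainder) none with
    | none => remainder
    | some best => best

-- ===== PRECONDITION & SPEC =====
def Spec_infer_source_feature_name (processed_feature_name : String) (numeric_cols : List String) (categorical_cols : List String) (out : String) : Prop := out = infer_source_feature_name_alt processed_feature_name numeric_cols categorical_cols
instance (processed_feature_name : String) (numeric_cols : List String) (categorical_cols : List String) (out : String) : Decidable (Spec_infer_source_feature_name processed_feature_name numeric_cols categorical_cols out) := by unfold Spec_infer_source_feature_name; infer_instance

-- ===== CLAIM (what is proved, stated in full; the proofs are below) =====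
def Claim_equal_infer_source_feature_name : Prop := ∀ (processed_feature_name : String) (numeric_cols : List String) (categorical_cols : List String), Dom_infer_source_feature_name processed_feature_name numeric_cols categorical_cols → Spec_infer_source_feature_name processed_feature_name numeric_cols categorical_cols (infer_source_feature_name processed_feature_name numeric_cols categorical_cols)

-- ===== LEMMAS AND PROOFS =====

-- first matching column of a list, as an Option
def pvFirstMatch (remainder : String) : List String → Option String
  | [] => none
  | col :: rest => if pvMatches remainder col then some col else pvFirstMatch remainder rest

lemma pvACatLoop_eq (rem : String) (l : List String) :
    pvACatLoop rem l = (pvFirstMatch rem l).getD rem := by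
  induction l with
  | nil => rfl
  | cons c cs ih => simp only [pvACatLoop, pvFirstMatch]; split <;> simp [ih]

lemma pvFirstMatch_mem (rem : String) (l : List String) (z : String)
    (h : pvFirstMatch rem l = some z) : z ∈ l := by
  induction l with
  | nil => simp [pvFirstMatch] at h
  | cons c cs ih =>
    simp only [pvFirstMatch] at h
    split at h
    · simp_all
    · exact List.mem_cons_of_mem _ (ih h)

-- inserting x into a length-descending list and then taking the first match
-- equals B's best-update step
lemma pvFirstMatch_insertBy (rem x : String) (l : List String)
    (hl : l.Pairwise (fun a b => PySem.Str.len b ≤ PySem.Str.len a)) :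
    pvFirstMatch rem (PySem.List.insertBy
        (fun a b => decide (PySem.Str.len b < PySem.Str.len a)) x l)
    = pvBStep rem (pvFirstMatch rem l) x := by
  induction l with
  | nil => simp [PySem.List.insertBy, pvFirstMatch, pvBStep]
  | cons y ys ih =>
    rw [List.pairwise_cons] at hl
    obtain ⟨hy, hys⟩ := hl
    simp only [PySem.List.insertBy]
    by_cases hlen : PySem.Str.len y < PySem.Str.len x
    · rw [if_pos (by simpa using hlen)]
      simp only [pvFirstMatch, pvBStep]
      by_cases hx : pvMatches rem x = true
      · rw [if_pos hx, if_pos hx]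
        cases hB : (if pvMatches rem y = true then some y else pvFirstMatch rem ys) with
        | none => rfl
        | some b =>
          have hb : b ∈ y :: ys := by
            split at hB
            · simp_all
            · exact List.mem_cons_of_mem _ (pvFirstMatch_mem rem ys b hB)
          have hlt : PySem.Str.len b < PySem.Str.len x := by
            rw [List.mem_cons] at hb
            rcases hb with hb | hb
            · exact hb ▸ hlen
            · exact lt_of_le_of_lt (hy b hb) hlen
          have hlt' : b.length < x.length := by
            have h := hlt; simp [PySem.Str.len] at h; exact_mod_cast h
          simp [hlt']
      · rw [if_neg hx, if_neg hx]
    · rw [if_neg (by simpa using hlen)]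
      simp only [pvFirstMatch]
      by_cases hym : pvMatches rem y = true
      · rw [if_pos hym, if_pos hym]
        have hlen' : ¬ y.length < x.length := by
          rw [not_lt] at hlen ⊢
          have h := hlen; simp [PySem.Str.len] at h; exact_mod_cast h
        simp [pvBStep, hlen']
      · rw [if_neg hym, if_neg hym]
        exact ih hys

-- A's scan of the stably length-descending-sorted list = B's fold over the original list
lemma pvMain (rem : String) (cats : List String) :
    pvFirstMatch rem (PySem.List.sorted cats (fun c => PySem.Str.len c) true)
    = cats.foldl (pvBStep rem) none := by
  induction cats using List.reverseRecOn with
  | nil => rfl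
  | append_singleton cs x ih =>
    rw [PySem.List.sorted_rev_eq_foldl_insertBy, List.foldl_append, List.foldl_append]
    rw [← PySem.List.sorted_rev_eq_foldl_insertBy]
    simp only [List.foldl_cons, List.foldl_nil]
    rw [pvFirstMatch_insertBy rem x _ (PySem.List.sorted_pairwise_rev cs _), ih]

-- stripping a present prefix: replaceOnce by "" = slice from len(prefix)
lemma pvReplaceOnce_of_prefix (s p : List Char) (hp : p.isPrefixOf s = true) :
    pvReplaceOnce s p [] = s.drop p.length := by
  rw [pvReplaceOnce.eq_def, if_pos hp]
  simp

-- ===== VERDICT (by name: the statement is the Claim_ definition above) =====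
theorem infer_source_feature_name_spec : Claim_equal_infer_source_feature_name := by
  intro name num cats _
  unfold Spec_infer_source_feature_name infer_source_feature_name infer_source_feature_name_alt
  by_cases h1 : PySem.Str.startswith name "num__" = true
  · rw [if_pos h1, if_pos h1]
    have hp : ("num__".toList).isPrefixOf name.toList = true := by
      rw [List.isPrefixOf_iff_prefix]
      exact (PySem.Chars.startswith_iff _ _).mp (by simpa using h1)
    rw [pvReplaceOnce_of_prefix _ _ hp]
    simp [PySem.List.slice_from]
  · rw [if_neg h1, if_neg h1]
    by_cases h2 : PySem.Str.startswith name "cat__" = true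
    · have h2' : PySem.Chars.startswith name.toList ['c', 'a', 't', '_', '_'] = true := by simpa using h2
      rw [if_pos h2, if_neg (by simp [h2'] : ¬ ((!PySem.Str.startswith name "cat__") = true))]
      have hp : ("cat__".toList).isPrefixOf name.toList = true := by
        rw [List.isPrefixOf_iff_prefix]
        exact (PySem.Chars.startswith_iff _ _).mp (by simpa using h2)
      rw [pvReplaceOnce_of_prefix _ _ hp,
          show PySem.List.slice name.toList (some 5) none = name.toList.drop 5 from by
            simp [PySem.List.slice_from],
          show ("cat__".toList.length : Nat) = 5 from rfl]
      rw [pvACatLoop_eq, pvMain]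
      cases hfold : cats.foldl (pvBStep _) none with
      | none => simp [hfold]
      | some b => simp [hfold]
    · have h2' : PySem.Chars.startswith name.toList ['c', 'a', 't', '_', '_'] = false := by simpa using h2
      rw [if_neg h2, if_pos (by simp [h2'] : (!PySem.Str.startswith name "cat__") = true)]
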